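-- pv_equiv track=rewrite | github.com/george-al3xandru/CodeWars | 8-kyu/I love you, a little , a lot, passionately ... not at all.py | how_much_i_love_you
-- ===== SOURCE A (Python) =====
-- def how_much_i_love_you(nb_petals):
--     phrases = ["I love you", "a little", "a lot", "passionately", "madly", "not at all"]
--     i = -1
--     while nb_petals > 0:
--         nb_petals -= 1
--         i += 1
--         if i == len(phrases):
--             i = 0
--     return phrases[i]
-- ===== SOURCE B (Python) =====
-- def how_much_i_love_you(nb_petals):
--     phrases = ["I love you", "a little", "a lot", "passionately", "madly", "not at all"]
--     if nb_petals <= 0: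
--         return "not at all"
--     return phrases[(nb_petals - 1) % 6]
-- ===== Notes on version B (the rewrite author's own statement) =====
-- stated objective: faster
-- what changed: Replaced the O(n) decrement-and-cycle while loop with a direct O(1) modular index (nb_petals-1) % 6, returning 'not at all' for non-positive counts (matching A's phrases[-1]).
import Mathlib
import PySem

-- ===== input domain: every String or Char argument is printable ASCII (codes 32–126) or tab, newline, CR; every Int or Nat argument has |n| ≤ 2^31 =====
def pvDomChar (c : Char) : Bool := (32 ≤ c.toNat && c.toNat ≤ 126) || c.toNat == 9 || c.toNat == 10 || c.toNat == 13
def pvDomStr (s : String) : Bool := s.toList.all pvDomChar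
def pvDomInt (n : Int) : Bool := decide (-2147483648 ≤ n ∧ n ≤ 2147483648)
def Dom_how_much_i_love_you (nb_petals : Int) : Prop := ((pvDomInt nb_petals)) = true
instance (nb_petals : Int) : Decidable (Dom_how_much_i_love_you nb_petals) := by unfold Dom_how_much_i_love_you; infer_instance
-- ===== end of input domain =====

-- B replaces A's O(n) decrement-and-cycle loop by a direct modular index lookup.
-- ===== PORT A =====
def pvPhrases : List String :=
  ["I love you", "a little", "a lot", "passionately", "madly", "not at all"]

-- the while loop: state (nb_petals, i); returns final i
def pvLoopA (nb_petals : Int) (i : Int) : Int :=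
  if nb_petals > 0 then
    pvLoopA (nb_petals - 1) (if i + 1 = 6 then 0 else i + 1)
  else i
termination_by nb_petals.toNat
decreasing_by omega

def how_much_i_love_you (nb_petals : Int) : String :=
  (PySem.List.pyGet? pvPhrases (pvLoopA nb_petals (-1))).getD ""

-- ===== PORT B =====
def how_much_i_love_you_alt (nb_petals : Int) : String :=
  if nb_petals ≤ 0 then "not at all"
  else (PySem.List.pyGet? pvPhrases (PySem.Int.mod (nb_petals - 1) 6)).getD ""

-- ===== PRECONDITION & SPEC =====
def Spec_how_much_i_love_you (nb_petals : Int) (out : String) : Prop := out = how_much_i_love_you_alt nb_petals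
instance (nb_petals : Int) (out : String) : Decidable (Spec_how_much_i_love_you nb_petals out) := by unfold Spec_how_much_i_love_you; infer_instance

-- ===== CLAIM (what is proved, stated in full; the proofs are below) =====
def Claim_equal_how_much_i_love_you : Prop := ∀ (nb_petals : Int), Dom_how_much_i_love_you nb_petals → Spec_how_much_i_love_you nb_petals (how_much_i_love_you nb_petals)

-- ===== LEMMAS AND PROOFS =====


-- loop characterisation: starting from 0 ≤ i < 6 with n ≥ 0 steps, the loop ends at (i+n) % 6
theorem pvLoopA_inv (n : Int) (i : Int) (hn : 0 ≤ n) (h0 : 0 ≤ i) (h6 : i < 6) :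
    pvLoopA n i = (i + n) % 6 := by
  induction n, hn using Int.le_induction generalizing i with
  | base => simp [pvLoopA]; omega
  | succ n hn ih =>
    rw [pvLoopA]
    simp only [show n + 1 > 0 by omega, if_pos, show n + 1 - 1 = n by ring]
    split_ifs with h
    · rw [ih 0 (by omega) (by omega)]
      omega
    · rw [ih (i+1) (by omega) (by omega)]
      omega

theorem pvLoopA_pos (n : Int) (hn : 0 < n) : pvLoopA n (-1) = (n - 1) % 6 := by
  rw [pvLoopA]
  simp only [if_pos hn]
  norm_num
  rw [pvLoopA_inv (n-1) 0 (by omega) (by omega) (by omega)]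
  ring_nf

-- ===== VERDICT (by name: the statement is the Claim_ definition above) =====
theorem how_much_i_love_you_spec : Claim_equal_how_much_i_love_you := by
  intro n _
  unfold Spec_how_much_i_love_you how_much_i_love_you how_much_i_love_you_alt
  by_cases h : n ≤ 0
  · rw [if_pos h, pvLoopA]
    rw [if_neg (by omega)]
    decide
  · rw [if_neg h, pvLoopA_pos n (by omega)]
    have hm : PySem.Int.mod (n - 1) 6 = (n - 1) % 6 := by
      simp [PySem.Int.mod, Int.fmod_eq_emod]
    rw [hm]
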